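-- pv_equiv track=rewrite | github.com/syntra-vindevoy/python-1-2024 | oefeningen/5_chars/functions.py | get_all_char_combination_set
-- ===== SOURCE A (Python) =====
-- def get_all_char_combination_set(character_stringlist):
--     character_combinations = set()
--     length = len(character_stringlist)
--
--     for i in range(0,length-4):
--         char_1 = character_stringlist[i]
--         character_combinations.add(''.join([char_1]))
--         for j in range (i+1,length-3):
--             char_2 = character_stringlist[j]
--             character_combinations.add(''.join([char_1,char_2]))
--             for k in range (j+1,length-2):
--                 char_3 = character_stringlist[k]
--                 character_combinations.add(''.join([char_1,char_2,char_3]))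
--                 for l in range (k+1,length-1):
--                     char_4 = character_stringlist[l]
--                     character_combinations.add(''.join([char_1,char_2,char_3,char_4]))
--                     for m in range (l+1,length):
--                         char_5 = character_stringlist[m]
--                         character_combinations \
--                         .add(''.join([char_1,char_2,char_3,char_4,char_5]))
--     return character_combinations
-- ===== SOURCE B (Python) =====
-- def get_all_char_combination_set(character_stringlist):
--     def combos(lst, r):
--         if r == 0:
--             yield ()
--         elif lst:
--             first, rest = lst[0], lst[1:]
--             for tail in combos(rest, r - 1):
--                 yield (first,) + tail
--             yield from combos(rest, r)
--
--     result = set()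
--     for combo in combos(list(character_stringlist), 5):
--         prefix = ''
--         for part in combo:
--             prefix += part
--             result.add(prefix)
--     return result
-- ===== Notes on version B (the rewrite author's own statement) =====
-- stated objective: simpler
-- what changed: Replaced A's five hand-written nested index loops over ranges by a recursive combinations generator that yields each strictly increasing 5-element subsequence once and adds its running prefixes to the set.
import Mathlib
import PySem

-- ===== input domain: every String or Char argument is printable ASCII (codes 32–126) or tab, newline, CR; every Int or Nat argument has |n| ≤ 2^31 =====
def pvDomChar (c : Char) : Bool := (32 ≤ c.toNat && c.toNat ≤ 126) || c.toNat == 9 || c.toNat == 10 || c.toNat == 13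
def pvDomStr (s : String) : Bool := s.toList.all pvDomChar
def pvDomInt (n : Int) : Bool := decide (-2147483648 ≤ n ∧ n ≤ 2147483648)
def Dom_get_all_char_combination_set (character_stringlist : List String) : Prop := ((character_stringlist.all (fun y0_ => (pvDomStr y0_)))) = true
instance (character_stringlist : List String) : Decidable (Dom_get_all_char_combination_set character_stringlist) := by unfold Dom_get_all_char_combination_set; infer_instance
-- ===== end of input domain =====

-- B replaces A's five hand-written nested index loops by a recursive combinations
-- generator: it enumerates every strictly increasing 5-element subsequence once and
-- records its running prefixes (objective: simpler decomposition; same result set).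

-- ===== PORT A =====
-- literal transliteration of the five nested index loops over a Python set
def get_all_char_combination_set (character_stringlist : List String) : List String :=
  let n : Int := character_stringlist.length
  (PySem.List.pyRange 0 (n - 4) 1).foldl (fun s i =>
    let c1 := PySem.List.pyGetD character_stringlist i ""
    let s := PySem.Set.add s c1
    (PySem.List.pyRange (i + 1) (n - 3) 1).foldl (fun s j =>
      let c2 := PySem.List.pyGetD character_stringlist j ""
      let s := PySem.Set.add s (c1 ++ c2)
      (PySem.List.pyRange (j + 1) (n - 2) 1).foldl (fun s k =>
        let c3 := PySem.List.pyGetD character_stringlist k ""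
        let s := PySem.Set.add s ((c1 ++ c2) ++ c3)
        (PySem.List.pyRange (k + 1) (n - 1) 1).foldl (fun s l =>
          let c4 := PySem.List.pyGetD character_stringlist l ""
          let s := PySem.Set.add s (((c1 ++ c2) ++ c3) ++ c4)
          (PySem.List.pyRange (l + 1) n 1).foldl (fun s m =>
            let c5 := PySem.List.pyGetD character_stringlist m ""
            PySem.Set.add s ((((c1 ++ c2) ++ c3) ++ c4) ++ c5)) s) s) s) s) PySem.Set.empty

-- ===== PORT B =====
-- B's recursive combinations generator (yields the lexicographic order of itertools)
def pvComb (r : Nat) (lst : List String) : List (List String) :=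
  match r, lst with
  | 0, _ => [[]]
  | _ + 1, [] => []
  | r + 1, x :: rest => ((pvComb r rest).map (fun c => x :: c)) ++ pvComb (r + 1) rest

-- B's inner loop: add every running prefix of one combination to the set
def pvAddChain (s : PySem.Set String) (pre : String) (c : List String) : PySem.Set String :=
  match c with
  | [] => s
  | x :: rest => pvAddChain (PySem.Set.add s (pre ++ x)) (pre ++ x) rest

def get_all_char_combination_set_alt (character_stringlist : List String) : List String :=
  (pvComb 5 character_stringlist).foldl (fun s c => pvAddChain s "" c) PySem.Set.empty

-- ===== PRECONDITION & SPEC =====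
def Spec_get_all_char_combination_set (character_stringlist : List String) (out : List String) : Prop := out = get_all_char_combination_set_alt character_stringlist
instance (character_stringlist : List String) (out : List String) : Decidable (Spec_get_all_char_combination_set character_stringlist out) := by unfold Spec_get_all_char_combination_set; infer_instance

-- ===== CLAIM (what is proved, stated in full; the proofs are below) =====
def Claim_equal_get_all_char_combination_set : Prop := ∀ (character_stringlist : List String), Dom_get_all_char_combination_set character_stringlist → Spec_get_all_char_combination_set character_stringlist (get_all_char_combination_set character_stringlist)

-- ===== LEMMAS AND PROOFS =====

-- generic form of A's nested loops: r picks remaining, accumulated prefix, start index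
def pvLoopA (xs : List String) : Nat → String → Int → PySem.Set String → PySem.Set String
  | 0, _, _, s => s
  | r + 1, pre, t, s =>
    (PySem.List.pyRange t ((xs.length : Int) - r) 1).foldl
      (fun s i =>
        pvLoopA xs r (pre ++ PySem.List.pyGetD xs i "")
          (i + 1) (PySem.Set.add s (pre ++ PySem.List.pyGetD xs i ""))) s

lemma pvComb_short : ∀ (r : Nat) (L : List String), L.length < r → pvComb r L = [] := by
  intro r L
  induction L generalizing r with
  | nil => intro h; cases r with
    | zero => omega
    | succ r => rfl
  | cons x rest ih =>
    intro h
    cases r with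
    | zero => omega
    | succ r =>
      simp only [pvComb]
      rw [ih r (by simpa using Nat.lt_of_succ_lt_succ h), ih (r + 1) (by simp at h ⊢; omega)]
      rfl

lemma pvComb_ne_nil : ∀ (r : Nat) (L : List String), r ≤ L.length → pvComb r L ≠ [] := by
  intro r L
  induction L generalizing r with
  | nil => intro h; cases r with
    | zero => simp [pvComb]
    | succ r => simp at h
  | cons x rest ih =>
    intro h
    cases r with
    | zero => simp [pvComb]
    | succ r =>
      simp only [pvComb]
      intro hc
      rcases List.append_eq_nil_iff.mp hc with ⟨h1, _⟩
      exact ih r (by simp at h; omega) (List.map_eq_nil_iff.mp h1)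

lemma mem_pvAddChain {a : String} : ∀ (c : List String) (s : PySem.Set String) (pre : String),
    a ∈ s → a ∈ pvAddChain s pre c := by
  intro c
  induction c with
  | nil => intro s pre h; exact h
  | cons x rest ih =>
    intro s pre h
    exact ih _ _ ((PySem.Set.mem_add _ _ _).mpr (Or.inl h))

lemma pvAbsorb (a : String) : ∀ (K : List (List String)) (s : PySem.Set String), a ∈ s →
    K.foldl (fun s c => pvAddChain (PySem.Set.add s a) a c) s
      = K.foldl (fun s c => pvAddChain s a c) s := by
  intro K
  induction K with
  | nil => intro s _; rfl
  | cons c K ih =>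
    intro s h
    simp only [List.foldl_cons, PySem.Set.add_of_mem h]
    exact ih _ (mem_pvAddChain c s a h)

lemma pvChainMap (K : List (List String)) (hK : K ≠ []) (pre x : String) (s : PySem.Set String) :
    (K.map (fun c => x :: c)).foldl (fun s c => pvAddChain s pre c) s
      = K.foldl (fun s c => pvAddChain s (pre ++ x) c) (PySem.Set.add s (pre ++ x)) := by
  rw [List.foldl_map]
  cases K with
  | nil => exact absurd rfl hK
  | cons c K =>
    simp only [List.foldl_cons]
    show (K.foldl (fun s c => pvAddChain (PySem.Set.add s (pre ++ x)) (pre ++ x) c)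
        (pvAddChain (PySem.Set.add s (pre ++ x)) (pre ++ x) c)) = _
    rw [pvAbsorb (pre ++ x) K _ (mem_pvAddChain c _ _ ((PySem.Set.mem_add _ _ _).mpr (Or.inr rfl)))]

lemma pvLoop_eq (xs : List String) : ∀ (m r t : Nat) (pre : String) (s : PySem.Set String),
    xs.length ≤ t + m → t ≤ xs.length →
    pvLoopA xs r pre (t : Int) s
      = (pvComb r (xs.drop t)).foldl (fun s c => pvAddChain s pre c) s := by
  intro m
  induction m with
  | zero =>
    intro r t pre s h1 h2
    have ht : t = xs.length := by omega
    cases r with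
    | zero => simp [pvLoopA, pvComb, pvAddChain]
    | succ r =>
      rw [pvLoopA, PySem.List.pyRange_one_eq_nil (by omega),
        pvComb_short (r + 1) _ (by simp [ht])]
      rfl
  | succ m ih =>
    intro r t pre s h1 h2
    by_cases ht : t = xs.length
    · cases r with
      | zero => simp [pvLoopA, pvComb, pvAddChain]
      | succ r =>
        rw [pvLoopA, PySem.List.pyRange_one_eq_nil (by omega),
          pvComb_short (r + 1) _ (by simp [ht])]
        rfl
    · have htlt : t < xs.length := lt_of_le_of_ne h2 ht
      cases r with
      | zero => simp [pvLoopA, pvComb, pvAddChain]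
      | succ r =>
        rw [pvLoopA]
        by_cases hr : (xs.length : Int) - r ≤ (t : Int)
        · rw [PySem.List.pyRange_one_eq_nil hr,
            pvComb_short (r + 1) _ (by simp; omega)]
          rfl
        · push Not at hr
          rw [PySem.List.pyRange_one_cons hr]
          simp only [List.foldl_cons]
          have hdrop : xs.drop t = xs[t] :: xs.drop (t + 1) := List.drop_eq_getElem_cons htlt
          have hget : PySem.List.pyGetD xs (t : Int) "" = xs[t] := by
            simp [PySem.List.pyGetD_natCast, List.getElem?_eq_getElem htlt]
          have hcast : (t : Int) + 1 = ((t + 1 : Nat) : Int) := by push_cast; ring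
          -- the tail of the fold is pvLoopA (r+1) at start t+1
          have htail : ∀ s' : PySem.Set String,
              (PySem.List.pyRange ((t : Int) + 1) ((xs.length : Int) - r) 1).foldl
                (fun s i => pvLoopA xs r (pre ++ PySem.List.pyGetD xs i "")
                  (i + 1) (PySem.Set.add s (pre ++ PySem.List.pyGetD xs i ""))) s'
              = pvLoopA xs (r + 1) pre ((t : Int) + 1) s' := by
            intro s'; rw [pvLoopA]
          rw [htail, hget, hcast, ih (r + 1) (t + 1) pre _ (by omega) (by omega),
            ih r (t + 1) (pre ++ xs[t]) _ (by omega) (by omega), hdrop]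
          show _ = (pvComb (r + 1) (xs[t] :: xs.drop (t + 1))).foldl
            (fun s c => pvAddChain s pre c) s
          simp only [pvComb, List.foldl_append]
          rw [pvChainMap _ (pvComb_ne_nil r _ (by simp; omega)) pre xs[t] s]

lemma pvA_eq_loop (xs : List String) :
    get_all_char_combination_set xs = pvLoopA xs 5 "" 0 PySem.Set.empty := by
  simp only [get_all_char_combination_set, pvLoopA]
  norm_num [String.empty_append]

-- ===== VERDICT (by name: the statement is the Claim_ definition above) =====
theorem get_all_char_combination_set_spec : Claim_equal_get_all_char_combination_set := by
  intro xs _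
  show get_all_char_combination_set xs = get_all_char_combination_set_alt xs
  rw [pvA_eq_loop, get_all_char_combination_set_alt]
  have := pvLoop_eq xs xs.length 5 0 "" PySem.Set.empty (by omega) (by omega)
  simpa using this
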